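-- pv_equiv track=rewrite | github.com/puppetjellyfish/lavbot | bot.py | resolve_memory_reference
-- ===== SOURCE A (Python) =====
-- def normalize_memory_text(text: str) -> str:
-- 	cleaned = " ".join((text or "").strip().lower().split())
-- 	return cleaned.strip(" .!?\"'")
--
-- MEMORY_SUBJECT_ALIASES: dict[str, list[str]] = {
-- 	"birthday":       ["birthday", "born", "birth date", "bday", "birth"],
-- 	"name":           ["name", "called", "goes by", "known as", "full name"],
-- 	"pronouns":       ["pronouns", "he/him", "she/her", "they/them", "he him", "she her", "they them"],
-- 	"favorite food":  ["favorite food", "favourite food", "likes to eat", "loves eating"],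
-- 	"favorite color": ["favorite color", "favourite color", "colour preference", "color preference"],
-- 	"pet":            ["pet", "dog", "cat", "animal", "kitten", "puppy"],
-- 	"job":            ["job", "career", "profession", "occupation", "works as"],
-- 	"location":       ["lives in", "location", "city", "town", "home", "based in"],
-- 	"relationship":   ["relationship", "dating", "partner", "boyfriend", "girlfriend", "spouse", "married"],
-- 	"hobby":          ["hobby", "hobbies", "likes to do", "enjoys", "pastime", "interest"],
-- 	"age":            ["years old", "born in", "born on"],
-- }
--
-- def _subject_keywords(text: str) -> set[str]:
-- 	"""Return canonical subject keys whose aliases appear in the normalized text."""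
-- 	normalized = normalize_memory_text(text)
-- 	matched: set[str] = set()
-- 	for canonical, aliases in MEMORY_SUBJECT_ALIASES.items():
-- 		for alias in aliases:
-- 			if alias in normalized:
-- 				matched.add(canonical)
-- 				break
-- 	return matched
--
-- def resolve_memory_reference(memories: list[tuple[int, str, str]], reference: str) -> tuple[int, str, str] | None:
-- 	target = normalize_memory_text(reference)
-- 	if not target:
-- 		return None
--
-- 	exact_matches = [row for row in memories if normalize_memory_text(row[1]) == target]
-- 	if len(exact_matches) == 1:
-- 		return exact_matches[0]
--
-- 	contains_matches = [
-- 		row for row in memories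
-- 		if target in normalize_memory_text(row[1]) or normalize_memory_text(row[1]) in target
-- 	]
-- 	if len(contains_matches) == 1:
-- 		return contains_matches[0]
--
-- 	# Subject-aware fallback: find memories sharing a subject keyword with the reference
-- 	# (e.g. "birthday" matches "her birthday is march 5th" even with no substring overlap).
-- 	ref_subjects = _subject_keywords(reference)
-- 	if ref_subjects:
-- 		subject_matches = [row for row in memories if ref_subjects & _subject_keywords(row[1])]
-- 		if len(subject_matches) == 1:
-- 			return subject_matches[0]
--
-- 	return None
-- ===== SOURCE B (Python) =====
-- def normalize_memory_text(text: str) -> str: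
-- 	cleaned = " ".join((text or "").strip().lower().split())
-- 	return cleaned.strip(" .!?\"'")
--
-- MEMORY_SUBJECT_ALIASES: dict[str, list[str]] = {
-- 	"birthday":       ["birthday", "born", "birth date", "bday", "birth"],
-- 	"name":           ["name", "called", "goes by", "known as", "full name"],
-- 	"pronouns":       ["pronouns", "he/him", "she/her", "they/them", "he him", "she her", "they them"],
-- 	"favorite food":  ["favorite food", "favourite food", "likes to eat", "loves eating"],
-- 	"favorite color": ["favorite color", "favourite color", "colour preference", "color preference"],
-- 	"pet":            ["pet", "dog", "cat", "animal", "kitten", "puppy"],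
-- 	"job":            ["job", "career", "profession", "occupation", "works as"],
-- 	"location":       ["lives in", "location", "city", "town", "home", "based in"],
-- 	"relationship":   ["relationship", "dating", "partner", "boyfriend", "girlfriend", "spouse", "married"],
-- 	"hobby":          ["hobby", "hobbies", "likes to do", "enjoys", "pastime", "interest"],
-- 	"age":            ["years old", "born in", "born on"],
-- }
--
-- def _subject_keywords(text: str) -> set[str]:
-- 	normalized = normalize_memory_text(text)
-- 	matched: set[str] = set()
-- 	for canonical, aliases in MEMORY_SUBJECT_ALIASES.items():
-- 		for alias in aliases:
-- 			if alias in normalized: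
-- 				matched.add(canonical)
-- 				break
-- 	return matched
--
-- def resolve_memory_reference(memories: list[tuple[int, str, str]], reference: str) -> tuple[int, str, str] | None:
-- 	# Single pass: normalize each row's text once and keep three priority buckets.
-- 	target = normalize_memory_text(reference)
-- 	if not target:
-- 		return None
-- 	ref_subjects = _subject_keywords(reference)
-- 	exact, contains, subject = [], [], []
-- 	for row in memories:
-- 		norm = normalize_memory_text(row[1])
-- 		if norm == target:
-- 			exact.append(row)
-- 		if target in norm or norm in target:
-- 			contains.append(row)
-- 		if ref_subjects and ref_subjects & _subject_keywords(row[1]):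
-- 			subject.append(row)
-- 	if len(exact) == 1:
-- 		return exact[0]
-- 	if len(contains) == 1:
-- 		return contains[0]
-- 	if len(subject) == 1:
-- 		return subject[0]
-- 	return None
-- ===== Notes on version B (the rewrite author's own statement) =====
-- stated objective: alternative
-- what changed: A's three separate comprehension scans over memories (exact, contains, subject) are replaced by one fold that normalizes each row's text once and maintains the three priority buckets, with the selection done after the single traversal.
import Mathlib
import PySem

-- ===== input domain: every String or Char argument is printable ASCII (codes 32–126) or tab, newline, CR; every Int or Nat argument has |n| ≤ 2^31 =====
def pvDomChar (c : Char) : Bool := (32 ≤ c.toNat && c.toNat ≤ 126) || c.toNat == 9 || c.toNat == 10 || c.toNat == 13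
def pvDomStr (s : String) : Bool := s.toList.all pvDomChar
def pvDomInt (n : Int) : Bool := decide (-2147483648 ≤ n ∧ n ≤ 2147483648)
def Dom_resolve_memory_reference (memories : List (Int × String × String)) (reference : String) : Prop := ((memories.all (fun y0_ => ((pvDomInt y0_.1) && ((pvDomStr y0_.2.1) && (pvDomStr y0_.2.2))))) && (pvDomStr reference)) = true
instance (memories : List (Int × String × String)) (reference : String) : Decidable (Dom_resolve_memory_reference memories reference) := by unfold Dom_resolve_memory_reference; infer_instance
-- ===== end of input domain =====

-- B replaces A's three separate scans of `memories` by one pass that normalizes each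
-- row's text once and maintains the three priority buckets (objective: alternative).

-- ===== PORT A =====
-- shared helpers: normalize_memory_text, MEMORY_SUBJECT_ALIASES and _subject_keywords
-- are identical source code in Source A and Source B, so both ports use these definitions.
def normalize_memory_text (text : String) : String :=
  let cleaned := PySem.Str.join " " (PySem.Str.split₀ (PySem.Str.lower (PySem.Str.strip text)))
  PySem.Str.stripChars cleaned " .!?\"'"

def MEMORY_SUBJECT_ALIASES : List (String × List String) :=
  [("birthday", ["birthday", "born", "birth date", "bday", "birth"]),
   ("name", ["name", "called", "goes by", "known as", "full name"]),
   ("pronouns", ["pronouns", "he/him", "she/her", "they/them", "he him", "she her", "they them"]),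
   ("favorite food", ["favorite food", "favourite food", "likes to eat", "loves eating"]),
   ("favorite color", ["favorite color", "favourite color", "colour preference", "color preference"]),
   ("pet", ["pet", "dog", "cat", "animal", "kitten", "puppy"]),
   ("job", ["job", "career", "profession", "occupation", "works as"]),
   ("location", ["lives in", "location", "city", "town", "home", "based in"]),
   ("relationship", ["relationship", "dating", "partner", "boyfriend", "girlfriend", "spouse", "married"]),
   ("hobby", ["hobby", "hobbies", "likes to do", "enjoys", "pastime", "interest"]),
   ("age", ["years old", "born in", "born on"])]

-- the inner 'for alias … if alias in normalized: add; break' adds the canonical key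
-- iff some alias is a substring, i.e. List.any
def subject_keywords (text : String) : PySem.Set String :=
  let normalized := normalize_memory_text text
  MEMORY_SUBJECT_ALIASES.foldl
    (fun matched ca =>
      if ca.2.any (fun al => PySem.Str.isIn al normalized)
      then PySem.Set.add matched ca.1 else matched)
    PySem.Set.empty

def resolve_memory_reference (memories : List (Int × String × String)) (reference : String) : Option (Int × String × String) :=
  let target := normalize_memory_text reference
  if target == "" then none
  else
    let exact_matches := memories.filter (fun row => normalize_memory_text row.2.1 == target)
    if exact_matches.length == 1 then exact_matches[0]?
    else
      let contains_matches := memories.filter (fun row =>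
        PySem.Str.isIn target (normalize_memory_text row.2.1) || PySem.Str.isIn (normalize_memory_text row.2.1) target)
      if contains_matches.length == 1 then contains_matches[0]?
      else
        let ref_subjects := subject_keywords reference
        if ref_subjects.isEmpty then none
        else
          let subject_matches := memories.filter (fun row =>
            !(PySem.Set.inter ref_subjects (subject_keywords row.2.1)).isEmpty)
          if subject_matches.length == 1 then subject_matches[0]? else none

-- ===== PORT B =====
def resolve_memory_reference_alt (memories : List (Int × String × String)) (reference : String) : Option (Int × String × String) :=
  let target := normalize_memory_text reference
  if target == "" then none
  else
    let ref_subjects := subject_keywords reference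
    let buckets := memories.foldl
      (fun acc row =>
        let norm := normalize_memory_text row.2.1
        (if norm == target then acc.1 ++ [row] else acc.1,
         if PySem.Str.isIn target norm || PySem.Str.isIn norm target then acc.2.1 ++ [row] else acc.2.1,
         if !ref_subjects.isEmpty && !(PySem.Set.inter ref_subjects (subject_keywords row.2.1)).isEmpty
         then acc.2.2 ++ [row] else acc.2.2))
      ([], [], [])
    if buckets.1.length == 1 then buckets.1[0]?
    else if buckets.2.1.length == 1 then buckets.2.1[0]?
    else if buckets.2.2.length == 1 then buckets.2.2[0]?
    else none

-- ===== PRECONDITION & SPEC =====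
def Spec_resolve_memory_reference (memories : List (Int × String × String)) (reference : String) (out : Option (Int × String × String)) : Prop := out = resolve_memory_reference_alt memories reference
instance (memories : List (Int × String × String)) (reference : String) (out : Option (Int × String × String)) : Decidable (Spec_resolve_memory_reference memories reference out) := by unfold Spec_resolve_memory_reference; infer_instance

-- ===== CLAIM (what is proved, stated in full; the proofs are below) =====
def Claim_equal_resolve_memory_reference : Prop := ∀ (memories : List (Int × String × String)) (reference : String), Dom_resolve_memory_reference memories reference → Spec_resolve_memory_reference memories reference (resolve_memory_reference memories reference)

-- ===== LEMMAS AND PROOFS =====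

-- B's single pass produces exactly A's three filtered lists
lemma pv_buckets (target : String) (rs : PySem.Set String)
    (mem : List (Int × String × String)) (a b c : List (Int × String × String)) :
    mem.foldl
      (fun acc row =>
        let norm := normalize_memory_text row.2.1
        (if norm == target then acc.1 ++ [row] else acc.1,
         if PySem.Str.isIn target norm || PySem.Str.isIn norm target then acc.2.1 ++ [row] else acc.2.1,
         if !rs.isEmpty && !(PySem.Set.inter rs (subject_keywords row.2.1)).isEmpty
         then acc.2.2 ++ [row] else acc.2.2))
      (a, b, c)
    = (a ++ mem.filter (fun row => normalize_memory_text row.2.1 == target),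
       b ++ mem.filter (fun row =>
         PySem.Str.isIn target (normalize_memory_text row.2.1) || PySem.Str.isIn (normalize_memory_text row.2.1) target),
       c ++ mem.filter (fun row => !rs.isEmpty && !(PySem.Set.inter rs (subject_keywords row.2.1)).isEmpty)) := by
  induction mem generalizing a b c with
  | nil => simp
  | cons h t ih =>
    simp only [List.foldl_cons, List.filter_cons, ih]
    split_ifs <;> simp_all

-- ===== VERDICT (by name: the statement is the Claim_ definition above) =====
theorem resolve_memory_reference_spec : Claim_equal_resolve_memory_reference := by
  intro memories reference _
  unfold Spec_resolve_memory_reference resolve_memory_reference resolve_memory_reference_alt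
  simp only [pv_buckets, List.nil_append]
  by_cases ht : (normalize_memory_text reference == "") = true
  · simp [ht]
  · simp only [ht, if_false, Bool.false_eq_true]
    by_cases hre : (subject_keywords reference).isEmpty = true
    · simp [hre]
    · simp [hre]
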